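-- pv_equiv track=rewrite | github.com/ibnahmadCoded/ASCII-Codes---Understanding-and-Implementing-them-in-Python | v8_code.py | ascii_sum
-- ===== SOURCE A (Python) =====
-- def ascii_sum(text):
--
--     vowels = ["a", "e", "i", "o", "u"]
--     adds = 0
--
--     for char in text:
--         if char.isalpha() == False:
--             pass
--         elif char in vowels:
--             adds -= ord(char)
--         else:
--             adds += ord(char)
--     return adds
-- ===== SOURCE B (Python) =====
-- def ascii_sum(text):
--     total = sum(ord(c) for c in text if c.isalpha())
--     vowel = sum(ord(c) for c in text if c in ("a", "e", "i", "o", "u"))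
--     return total - 2 * vowel
-- ===== Notes on version B (the rewrite author's own statement) =====
-- stated objective: alternative
-- what changed: Replaces the single per-character branching loop with two independent filtered sums: the sum of codes of all alphabetic characters minus twice the sum of codes of lowercase vowels.
import Mathlib
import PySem

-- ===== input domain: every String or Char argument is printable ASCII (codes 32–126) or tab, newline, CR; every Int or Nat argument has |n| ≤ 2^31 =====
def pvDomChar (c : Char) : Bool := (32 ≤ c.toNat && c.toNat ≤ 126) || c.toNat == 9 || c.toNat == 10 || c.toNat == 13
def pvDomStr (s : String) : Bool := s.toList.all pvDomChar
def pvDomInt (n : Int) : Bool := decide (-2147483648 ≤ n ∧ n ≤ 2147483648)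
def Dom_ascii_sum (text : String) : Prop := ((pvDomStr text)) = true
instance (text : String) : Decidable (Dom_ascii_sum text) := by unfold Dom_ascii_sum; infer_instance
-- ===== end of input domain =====

-- B replaces A's single branching loop by two independent filtered sums (all-alpha sum minus twice the vowel sum); alternative decomposition, same cost.

-- ===== PORT A =====
def ascii_sum (text : String) : Int :=
  let vowels : List Char := ['a', 'e', 'i', 'o', 'u']
  text.toList.foldl (fun adds char =>
    if PySem.Chars.isalpha char = false then adds
    else if char ∈ vowels then adds - (char.toNat : Int)
    else adds + (char.toNat : Int)) 0

-- ===== PORT B =====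
def ascii_sum_alt (text : String) : Int :=
  let total : Int :=
    ((text.toList.filter (fun c => PySem.Chars.isalpha c)).map (fun c => (c.toNat : Int))).sum
  let vowel : Int :=
    ((text.toList.filter (fun c => decide (c ∈ (['a', 'e', 'i', 'o', 'u'] : List Char)))).map
      (fun c => (c.toNat : Int))).sum
  total - 2 * vowel

-- ===== PRECONDITION & SPEC =====
def Spec_ascii_sum (text : String) (out : Int) : Prop := out = ascii_sum_alt text
instance (text : String) (out : Int) : Decidable (Spec_ascii_sum text out) := by unfold Spec_ascii_sum; infer_instance

-- ===== CLAIM (what is proved, stated in full; the proofs are below) =====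
def Claim_equal_ascii_sum : Prop := ∀ (text : String), Dom_ascii_sum text → Spec_ascii_sum text (ascii_sum text)

-- ===== LEMMAS AND PROOFS =====

-- every lowercase vowel is alphabetic
lemma pv_vowel_alpha : ∀ c ∈ (['a', 'e', 'i', 'o', 'u'] : List Char), PySem.Chars.isalpha c = true := by
  simp [PySem.Chars.isalpha, PySem.Chars.isupper, PySem.Chars.islower]

lemma pv_loop_eq (l : List Char) (acc : Int) :
    l.foldl (fun adds char =>
      if PySem.Chars.isalpha char = false then adds
      else if char ∈ (['a', 'e', 'i', 'o', 'u'] : List Char) then adds - (char.toNat : Int)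
      else adds + (char.toNat : Int)) acc
    = acc + ((l.filter (fun c => PySem.Chars.isalpha c)).map (fun c => (c.toNat : Int))).sum
        - 2 * ((l.filter (fun c => decide (c ∈ (['a', 'e', 'i', 'o', 'u'] : List Char)))).map
            (fun c => (c.toNat : Int))).sum := by
  induction l generalizing acc with
  | nil => simp
  | cons c t ih =>
    rw [List.foldl_cons, ih, List.filter_cons, List.filter_cons]
    by_cases hv : c ∈ (['a', 'e', 'i', 'o', 'u'] : List Char)
    · have ha := pv_vowel_alpha c hv
      simp [ha, hv]
      ring
    · by_cases ha : PySem.Chars.isalpha c = true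
      · simp [ha, hv]
        ring
      · simp only [Bool.not_eq_true] at ha
        simp [ha, hv]

-- ===== VERDICT (by name: the statement is the Claim_ definition above) =====
theorem ascii_sum_spec : Claim_equal_ascii_sum := by
  intro text _
  unfold Spec_ascii_sum ascii_sum ascii_sum_alt
  simpa using pv_loop_eq text.toList 0
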